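-- pv_equiv track=rewrite | github.com/minjiKang33/programmers | 프로그래머스/0/181893. 배열 조각하기/배열 조각하기.py | solution
-- ===== SOURCE A (Python) =====
-- def solution(arr, query):
--     cnt = 0
--     for i in query:
--         if cnt % 2 == 0:
--             del arr[i+1:]
--         else:
--             del arr[:i]
--         cnt += 1
--     return arr
-- ===== SOURCE B (Python) =====
-- def solution(arr, query):
--     # Track the surviving window [lo, hi) of the original array; slice once at the end.
--     lo, hi = 0, len(arr)
--     cnt = 0
--     for i in query:
--         n = hi - lo
--         if cnt % 2 == 0:
--             s = i + 1
--             if s < 0: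
--                 s += n
--             s = max(0, min(n, s))
--             hi = lo + s
--         else:
--             s = i
--             if s < 0:
--                 s += n
--             s = max(0, min(n, s))
--             lo = lo + s
--         cnt += 1
--     return arr[lo:hi]
-- ===== Notes on version B (the rewrite author's own statement) =====
-- stated objective: alternative
-- what changed: Instead of physically deleting a prefix/suffix of the list at every query, B keeps the surviving window as a pair of integer offsets [lo,hi) (normalising each index with Python's slice-clamping rule) and slices the original array exactly once at the end; it avoids per-query copying/moving of elements but pays Python-level arithmetic per query, so it is not measurably faster.
import Mathlib
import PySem

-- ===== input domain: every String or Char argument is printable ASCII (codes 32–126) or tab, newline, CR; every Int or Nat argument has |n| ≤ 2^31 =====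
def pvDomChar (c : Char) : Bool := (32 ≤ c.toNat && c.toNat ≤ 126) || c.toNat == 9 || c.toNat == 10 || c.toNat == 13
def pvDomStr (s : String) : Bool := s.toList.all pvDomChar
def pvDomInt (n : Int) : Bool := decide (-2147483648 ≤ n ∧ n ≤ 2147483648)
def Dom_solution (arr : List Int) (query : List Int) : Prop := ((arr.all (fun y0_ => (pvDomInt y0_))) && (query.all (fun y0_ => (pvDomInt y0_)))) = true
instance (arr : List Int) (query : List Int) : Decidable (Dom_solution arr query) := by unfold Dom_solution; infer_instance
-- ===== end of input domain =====

-- B replaces per-query in-place list deletion by offset bookkeeping and one final slice (alternative algorithm);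
-- A mutates its `arr` argument in place while B does not — the equivalence proved here is about the return value only.

-- ===== PORT A =====
def solutionGo (arr : List Int) (cnt : Int) : List Int → List Int
  | [] => arr
  | i :: rest =>
      if PySem.Int.mod cnt 2 = 0 then
        solutionGo (PySem.List.slice arr none (some (i + 1))) (cnt + 1) rest
      else
        solutionGo (PySem.List.slice arr (some i) none) (cnt + 1) rest

def solution (arr : List Int) (query : List Int) : List Int :=
  solutionGo arr 0 query

-- ===== PORT B =====
def solutionAltGo (lo hi cnt : Int) : List Int → Int × Int
  | [] => (lo, hi)
  | i :: rest =>
      let n := hi - lo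
      if PySem.Int.mod cnt 2 = 0 then
        let s := i + 1
        let s := if s < 0 then s + n else s
        let s := max 0 (min n s)
        solutionAltGo lo (lo + s) (cnt + 1) rest
      else
        let s := i
        let s := if s < 0 then s + n else s
        let s := max 0 (min n s)
        solutionAltGo (lo + s) hi (cnt + 1) rest

def solution_alt (arr : List Int) (query : List Int) : List Int :=
  let p := solutionAltGo 0 (PySem.List.len arr) 0 query
  PySem.List.slice arr (some p.1) (some p.2)

-- ===== PRECONDITION & SPEC =====
def Spec_solution (arr : List Int) (query : List Int) (out : List Int) : Prop := out = solution_alt arr query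
instance (arr : List Int) (query : List Int) (out : List Int) : Decidable (Spec_solution arr query out) := by unfold Spec_solution; infer_instance

-- ===== CLAIM (what is proved, stated in full; the proofs are below) =====
def Claim_equal_solution : Prop := ∀ (arr : List Int) (query : List Int), Dom_solution arr query → Spec_solution arr query (solution arr query)

-- ===== LEMMAS AND PROOFS =====

-- B's explicit clamping arithmetic computes exactly PySem's slice-index clamp.
lemma altClamp_eq_clampIdx (n : Nat) (b : Int) :
    max 0 (min (n : Int) (if b < 0 then b + n else b)) = ((PySem.List.clampIdx n b : Nat) : Int) := by
  simp only [PySem.List.clampIdx]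
  split_ifs <;> omega

lemma slice_none_some_eq (xs : List Int) (b : Int) :
    PySem.List.slice xs none (some b) = xs.take (PySem.List.clampIdx xs.length b) := by
  simp [PySem.List.slice]

lemma go_eq (query : List Int) : ∀ (arr0 : List Int) (l h : Nat) (cnt : Int),
    h ≤ arr0.length → l ≤ h →
    solutionGo ((arr0.drop l).take (h - l)) cnt query
      = PySem.List.slice arr0 (some ((solutionAltGo (l : Int) (h : Int) cnt query).1))
          (some ((solutionAltGo (l : Int) (h : Int) cnt query).2)) := by
  induction query with
  | nil =>
      intro arr0 l h cnt hh hl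
      simp [solutionGo, solutionAltGo, PySem.List.slice_natCast]
  | cons i rest ih =>
      intro arr0 l h cnt hh hl
      have hwlen : ((arr0.drop l).take (h - l)).length = h - l := by
        simp [List.length_take, List.length_drop]; omega
      simp only [solutionGo, solutionAltGo]
      by_cases hpar : PySem.Int.mod cnt 2 = 0
      · simp only [if_pos hpar]
        -- even: keep prefix
        set c : Nat := PySem.List.clampIdx (h - l) (i + 1) with hc
        have hcle : c ≤ h - l := by
          simp only [hc, PySem.List.clampIdx]; split_ifs <;> omega
        have hs : max 0 (min ((h : Int) - (l : Int)) (if i + 1 < 0 then i + 1 + ((h : Int) - (l : Int)) else i + 1)) = (c : Int) := by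
          have := altClamp_eq_clampIdx (h - l) (i + 1)
          have hcast : ((h - l : Nat) : Int) = (h : Int) - (l : Int) := by omega
          rw [hcast] at this
          exact this
        rw [slice_none_some_eq, hwlen, ← hc]
        have htt : ((arr0.drop l).take (h - l)).take c = (arr0.drop l).take ((l + c) - l) := by
          rw [List.take_take]; congr 1; omega
        rw [htt, hs]
        have hlc : (l : Int) + (c : Int) = ((l + c : Nat) : Int) := by push_cast; ring
        rw [hlc]
        exact ih arr0 l (l + c) (cnt + 1) (by omega) (by omega)
      · simp only [if_neg hpar]
        -- odd: keep suffix
        set c : Nat := PySem.List.clampIdx (h - l) i with hc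
        have hcle : c ≤ h - l := by
          simp only [hc, PySem.List.clampIdx]; split_ifs <;> omega
        have hs : max 0 (min ((h : Int) - (l : Int)) (if i < 0 then i + ((h : Int) - (l : Int)) else i)) = (c : Int) := by
          have := altClamp_eq_clampIdx (h - l) i
          have hcast : ((h - l : Nat) : Int) = (h : Int) - (l : Int) := by omega
          rw [hcast] at this
          exact this
        rw [PySem.List.slice_some_none, hwlen, ← hc]
        have hdd : ((arr0.drop l).take (h - l)).drop c = (arr0.drop (l + c)).take (h - (l + c)) := by
          rw [List.drop_take, List.drop_drop]
          congr 1
          omega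
        rw [hdd, hs]
        have hlc : (l : Int) + (c : Int) = ((l + c : Nat) : Int) := by push_cast; ring
        rw [hlc]
        exact ih arr0 (l + c) h (cnt + 1) hh (by omega)

-- ===== VERDICT (by name: the statement is the Claim_ definition above) =====
theorem solution_spec : Claim_equal_solution := by
  intro arr query _
  unfold Spec_solution solution solution_alt
  have h := go_eq query arr 0 arr.length 0 (le_refl _) (Nat.zero_le _)
  simpa [PySem.List.len_eq] using h
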